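-- pv_equiv track=rewrite | github.com/valentino7/Accuratezza-dei-SASTT-nella-Rilevazione-di-Vulnerabilita-di-Sicurezza-nei-Progetti-Open-Source | RQ1_Struttura/Analizer_CWE_Structure.py | delete_double_father
-- ===== SOURCE A (Python) =====
-- def get_property(elem, dict):
--     for idx, edge in enumerate(dict["edges"]):
--         if elem == edge:
--             if dict["property"][idx] == "ChildOf":
--                 return dict["property"][idx]
--     return "-1"
--
-- def delete_double_father(dict):
--
--     for key, elem in dict.items():
--         temp_edge_list = []
--         temp_property_list = []
--
--         if "edges" in elem.keys():
--             find_list = {}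
--             for edge in elem["edges"]:
--                 find_list[edge] = 0
--             for idx, edge in enumerate(elem["edges"]):
--                 property = elem["property"][idx]
--                 for idx_2, edge_2 in enumerate(elem["edges"]):
--
--                     if edge == edge_2 and idx != idx_2:
--                         find_list[edge] += 1
--                         tmp = get_property(edge, elem)
--                         if not tmp == "-1":
--                             property = tmp
--                         break
--                 if find_list[edge] < 2:
--                     temp_edge_list.append(edge)
--                     temp_property_list.append(property)
--         elem["edges"] = temp_edge_list
--         elem["property"] = temp_property_list
--     return dict
-- ===== SOURCE B (Python) =====
-- def delete_double_father(dict):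
--     # Same in-place mutation of each inner dict as the original; single pass per element.
--     for key, elem in dict.items():
--         new_edges = []
--         new_props = []
--         if "edges" in elem:
--             edges = elem["edges"]
--             props = elem["property"] if edges else []
--             # one pass: occurrence count per edge
--             cnt = {}
--             for e in edges:
--                 cnt[e] = cnt.get(e, 0) + 1
--             # edges that carry the "ChildOf" property somewhere
--             childof = {e for e, p in zip(edges, props) if p == "ChildOf"}
--             # one pass: emit each edge at its first occurrence
--             seen = set()
--             for e, p in zip(edges, props):
--                 if e not in seen:
--                     seen.add(e)
--                     new_props.append("ChildOf" if cnt[e] > 1 and e in childof else p)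
--                     new_edges.append(e)
--         elem["edges"] = new_edges
--         elem["property"] = new_props
--     return dict
-- ===== Notes on version B (the rewrite author's own statement) =====
-- stated objective: alternative
-- what changed: A's per-element nested scans (for each edge an inner scan over all edges plus a full get_property scan) are replaced by three single passes: a count dict, a set of edges carrying ChildOf, and a seen-set emission of first occurrences.
import Mathlib
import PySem

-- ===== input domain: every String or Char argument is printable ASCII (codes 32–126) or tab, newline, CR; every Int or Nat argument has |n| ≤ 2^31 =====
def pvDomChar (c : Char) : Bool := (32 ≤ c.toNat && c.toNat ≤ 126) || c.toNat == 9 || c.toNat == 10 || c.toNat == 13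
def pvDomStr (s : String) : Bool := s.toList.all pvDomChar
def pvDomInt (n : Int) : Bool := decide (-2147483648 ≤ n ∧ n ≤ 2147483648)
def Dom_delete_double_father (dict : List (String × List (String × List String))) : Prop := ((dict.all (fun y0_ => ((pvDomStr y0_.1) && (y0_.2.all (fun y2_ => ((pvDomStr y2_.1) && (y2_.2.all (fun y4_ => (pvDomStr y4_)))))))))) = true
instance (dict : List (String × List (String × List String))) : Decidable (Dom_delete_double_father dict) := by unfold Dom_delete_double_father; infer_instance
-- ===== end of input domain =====

-- B replaces A's three nested scans per element by three single passes (count dict, ChildOf set,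
-- seen-set emission); both versions mutate each inner dict the same way, the theorem is about the result.

-- ===== PORT A =====
-- Python's enumerate(xs) starting at k
def pyEnum {α : Type} (k : Nat) : List α → List (Nat × α)
  | [] => []
  | x :: r => (k, x) :: pyEnum (k + 1) r

-- loop body of get_property: 'for idx, edge in enumerate(dict["edges"]): …'
def gpLoop (ps : List String) (e : String) : List (Nat × String) → String
  | [] => "-1"
  | q :: rest =>
    if e == q.2 then
      if PySem.List.pyGetD ps (q.1 : Int) "" == "ChildOf" then PySem.List.pyGetD ps (q.1 : Int) ""
      else gpLoop ps e rest
    else gpLoop ps e rest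

-- A's helper get_property(elem, dict)  (elem = the edge string, dict = the inner dict)
def get_property (e : String) (el : List (String × List String)) : String :=
  gpLoop ((PySem.Dict.mk el).getD "property" []) e (pyEnum 0 ((PySem.Dict.mk el).getD "edges" []))

-- A's inner 'for idx_2, edge_2 in enumerate(elem["edges"]): … break'
-- (find_list[edge] += 1 is written insert (getD + 1): the key was initialised, so no KeyError arises)
def innerScanA (el : List (String × List String)) (i : Nat) (e : String) :
    List (Nat × String) → PySem.Dict String Int → String → PySem.Dict String Int × String
  | [], f, p => (f, p)
  | q :: rest, f, p =>
    if e == q.2 && !(i == q.1) then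
      (f.insert e (f.getD e 0 + 1),
       if !(get_property e el == "-1") then get_property e el else p)
    else innerScanA el i e rest f p

-- body of A's middle loop 'for idx, edge in enumerate(elem["edges"])'
def stepA (el : List (String × List String)) (es : List String)
    (st : PySem.Dict String Int × List String × List String) (q : Nat × String) :
    PySem.Dict String Int × List String × List String :=
  let prop := PySem.List.pyGetD ((PySem.Dict.mk el).getD "property" []) (q.1 : Int) ""
  let r := innerScanA el q.1 q.2 (pyEnum 0 es) st.1 prop
  if r.1.getD q.2 0 < 2 then (r.1, st.2.1 ++ [q.2], st.2.2 ++ [r.2])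
  else (r.1, st.2.1, st.2.2)

-- A's body for one (key, elem) pair
def processA (el : List (String × List String)) : List (String × List String) :=
  let d := PySem.Dict.mk el
  let r :=
    if d.contains "edges" then
      let es := d.getD "edges" []
      let find0 := es.foldl (fun f e => f.insert e (0 : Int)) (PySem.Dict.mk [])
      ((pyEnum 0 es).foldl (stepA el es) (find0, [], [])).2
    else ([], [])
  ((d.insert "edges" r.1).insert "property" r.2).items

def delete_double_father (dict : List (String × List (String × List String))) : List (String × List (String × List String)) :=
  dict.map (fun kv => (kv.1, processA kv.2))

-- ===== PORT B =====
-- body of B's emission loop 'for e, p in zip(edges, props)'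
def stepB (cnt : PySem.Dict String Int) (childof : PySem.Set String)
    (st : PySem.Set String × List String × List String) (q : String × String) :
    PySem.Set String × List String × List String :=
  if PySem.Set.contains st.1 q.1 then st
  else
    (PySem.Set.add st.1 q.1,
     st.2.1 ++ [q.1],
     st.2.2 ++ [if 1 < cnt.getD q.1 0 ∧ PySem.Set.contains childof q.1 = true then "ChildOf" else q.2])

-- B's body for one (key, elem) pair
def processB (el : List (String × List String)) : List (String × List String) :=
  let d := PySem.Dict.mk el
  let r :=
    if d.contains "edges" then
      let es := d.getD "edges" []
      let ps := if es.isEmpty then [] else d.getD "property" []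
      let cnt := es.foldl (fun c e => c.insert e (c.getD e 0 + 1)) (PySem.Dict.mk [])
      let childof := PySem.Set.ofList (((es.zip ps).filter (fun q => q.2 == "ChildOf")).map (fun q => q.1))
      ((es.zip ps).foldl (stepB cnt childof) (PySem.Set.empty, [], [])).2
    else ([], [])
  ((d.insert "edges" r.1).insert "property" r.2).items

def delete_double_father_alt (dict : List (String × List (String × List String))) : List (String × List (String × List String)) :=
  dict.map (fun kv => (kv.1, processB kv.2))

-- ===== PRECONDITION & SPEC =====
-- Pre_ excludes exactly the inputs where A raises: an inner dict with a nonempty "edges" list whose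
-- "property" list is missing (KeyError) or shorter than "edges" (IndexError).
def Pre_delete_double_father (dict : List (String × List (String × List String))) : Prop :=
  ∀ p ∈ dict, (PySem.Dict.mk p.2).getD "edges" [] ≠ [] →
    (PySem.Dict.mk p.2).contains "property" = true ∧
    ((PySem.Dict.mk p.2).getD "edges" []).length ≤ ((PySem.Dict.mk p.2).getD "property" []).length

instance (dict : List (String × List (String × List String))) : Decidable (Pre_delete_double_father dict) := by
  unfold Pre_delete_double_father; infer_instance

def pvWitness_delete_double_father : (List (String × List (String × List String))) :=
  [("a", [("edges", ["x", "x", "y"]), ("property", ["p", "ChildOf", "q"])]), ("b", [("other", [])])]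

def Spec_delete_double_father (dict : List (String × List (String × List String))) (out : List (String × List (String × List String))) : Prop := out = delete_double_father_alt dict
instance (dict : List (String × List (String × List String))) (out : List (String × List (String × List String))) : Decidable (Spec_delete_double_father dict out) := by unfold Spec_delete_double_father; infer_instance

-- ===== CLAIM (what is proved, stated in full; the proofs are below) =====
def Claim_equal_delete_double_father : Prop := ∀ (dict : List (String × List (String × List String))), Dom_delete_double_father dict → Pre_delete_double_father dict → Spec_delete_double_father dict (delete_double_father dict)

-- ===== LEMMAS AND PROOFS =====

lemma pyEnum_append {α : Type} (a : List α) : ∀ (k : Nat) (b : List α),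
    pyEnum k (a ++ b) = pyEnum k a ++ pyEnum (k + a.length) b := by
  induction a with
  | nil => simp [pyEnum]
  | cons x r ih => intro k b; simp [pyEnum, ih (k+1) b]; ring_nf

lemma getD_find0 (l : List String) : ∀ (d : PySem.Dict String Int) (x : String),
    d.getD x 0 = 0 → (l.foldl (fun f e => f.insert e (0 : Int)) d).getD x 0 = 0 := by
  induction l with
  | nil => intro d x h; simpa [List.foldl]
  | cons e r ih =>
    intro d x h
    refine ih _ x ?_
    rw [PySem.Dict.getD_insert]
    split <;> simp [h]

lemma pyEnum_any_of_ne (i : Nat) (e : String) : ∀ (l : List String) (k : Nat),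
    (i < k ∨ k + l.length ≤ i) →
    ((pyEnum k l).any (fun q => e == q.2 && !(i == q.1))) = decide (e ∈ l) := by
  intro l
  induction l with
  | nil => simp [pyEnum]
  | cons x r ih =>
    intro k hk
    have hik : ¬ (i = k) := by simp only [List.length_cons] at hk; omega
    have : (i < k + 1 ∨ (k + 1) + r.length ≤ i) := by simp at hk ⊢; omega
    simp [pyEnum, ih (k+1) this]
    by_cases he : e = x <;> simp [he, hik]

lemma gpLoop_spec (ps : List String) (e : String) : ∀ (l : List String) (k : Nat),
    k + l.length ≤ ps.length →
    gpLoop ps e (pyEnum k l) =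
      if (l.zip (ps.drop k)).any (fun q => e == q.1 && q.2 == "ChildOf") then "ChildOf" else "-1" := by
  intro l
  induction l with
  | nil => simp [pyEnum, gpLoop]
  | cons x r ih =>
    intro k hk
    have hklt : k < ps.length := by simp only [List.length_cons] at hk; omega
    have hdrop : ps.drop k = ps[k] :: ps.drop (k+1) := List.drop_eq_getElem_cons hklt
    have hget : PySem.List.pyGetD ps (k : Int) "" = ps[k] := by
      simp [PySem.List.pyGetD_natCast, List.getD_eq_getElem?_getD, List.getElem?_eq_getElem hklt]
    have hk1 : (k+1) + r.length ≤ ps.length := by simp only [List.length_cons] at hk; omega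
    simp only [pyEnum, gpLoop]
    rw [ih (k+1) hk1, hdrop]
    simp only [List.zip_cons_cons, List.any_cons, hget]
    by_cases he : e = x
    · by_cases hc : ps[k] = "ChildOf"
      · simp [he, hc]
      · by_cases hany : ((r.zip (List.drop (k+1) ps)).any (fun q => e == q.1 && q.2 == "ChildOf")) = true
        · simp [he, hc]
        · simp [he, hc]
    · by_cases hany : ((r.zip (List.drop (k+1) ps)).any (fun q => e == q.1 && q.2 == "ChildOf")) = true
      · simp [he]
      · simp [he, hany]

lemma childof_contains (es ps : List String) (e : String) :
    PySem.Set.contains (PySem.Set.ofList (((es.zip ps).filter (fun q => q.2 == "ChildOf")).map (fun q => q.1))) e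
      = (es.zip ps).any (fun q => e == q.1 && q.2 == "ChildOf") := by
  rcases h : (es.zip ps).any (fun q => e == q.1 && q.2 == "ChildOf") with _ | _
  · simp only [List.any_eq_false] at h
    rw [Bool.eq_false_iff]
    intro hc
    rw [PySem.Set.contains_iff] at hc
    rw [PySem.Set.mem_ofList] at hc
    simp only [List.mem_map, List.mem_filter] at hc
    obtain ⟨q, ⟨hq, hcf⟩, hqe⟩ := hc
    have := h q hq
    simp_all
  · simp only [List.any_eq_true] at h
    obtain ⟨q, hq, hh⟩ := h
    rw [PySem.Set.contains_iff, PySem.Set.mem_ofList]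
    simp only [List.mem_map, List.mem_filter]
    exact ⟨q, ⟨hq, by simp_all⟩, by simp_all⟩

lemma anyOther_spec (pre rest : List String) (e : String) :
    ((pyEnum 0 (pre ++ e :: rest)).any (fun q => e == q.2 && !(pre.length == q.1)))
      = (decide (e ∈ pre) || decide (e ∈ rest)) := by
  rw [pyEnum_append pre 0 (e :: rest)]
  simp only [List.any_append, Nat.zero_add, pyEnum, List.any_cons]
  rw [pyEnum_any_of_ne pre.length e pre 0 (by omega),
      pyEnum_any_of_ne pre.length e rest (pre.length + 1) (by omega)]
  simp

lemma innerScanA_spec (el : List (String × List String)) (i : Nat) (e : String) :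
    ∀ (l : List (Nat × String)) (f : PySem.Dict String Int) (p : String),
      innerScanA el i e l f p =
        if l.any (fun q => e == q.2 && !(i == q.1)) then
          (f.insert e (f.getD e 0 + 1),
           if !(get_property e el == "-1") then get_property e el else p)
        else (f, p) := by
  intro l
  induction l with
  | nil => simp [innerScanA]
  | cons q rest ih =>
    intro f p
    by_cases hc : (e == q.2 && !(i == q.1)) = true
    · simp [innerScanA, hc]
    · simp only [innerScanA, List.any_cons]
      rw [if_neg (by simp_all), ih f p]
      have : (e == q.2 && !(i == q.1)) = false := by simp_all
      simp only [this, Bool.false_or]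
lemma seen_add_inv (seen : PySem.Set String) (pre : List String) (e : String)
    (hseen : ∀ x, PySem.Set.contains seen x = decide (x ∈ pre)) :
    ∀ x, PySem.Set.contains (PySem.Set.add seen e) x = decide (x ∈ pre ++ [e]) := by
  intro x
  have hmem : x ∈ seen ↔ x ∈ pre := by rw [← PySem.Set.contains_iff seen x, hseen x]; simp
  have h1 : PySem.Set.contains (PySem.Set.add seen e) x = true ↔ (x ∈ pre ∨ x = e) := by
    rw [PySem.Set.contains_iff, PySem.Set.mem_add, hmem]
  by_cases hx : x ∈ pre ++ [e]
  · have hx' : x ∈ pre ∨ x = e := by simpa using hx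
    have hd : decide (x ∈ pre ++ [e]) = true := by simpa using hx
    rw [hd]
    exact h1.mpr hx'
  · have hx' : ¬ (x ∈ pre ∨ x = e) := by simpa using hx
    have hd : decide (x ∈ pre ++ [e]) = false := by simpa using hx
    have h0 : PySem.Set.contains (PySem.Set.add seen e) x = false := by
      rw [Bool.eq_false_iff]; intro hc; exact hx' (h1.mp hc)
    rw [hd, h0]

lemma loop_eq (el : List (String × List String)) (es ps : List String)
    (cnt : PySem.Dict String Int) (childof : PySem.Set String)
    (hlen : es.length ≤ ps.length)
    (hed : (PySem.Dict.mk el).getD "edges" [] = es)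
    (hpr : (PySem.Dict.mk el).getD "property" [] = ps)
    (hcnt : ∀ x, cnt.getD x 0 = (es.count x : Int))
    (hch : ∀ x, PySem.Set.contains childof x = (es.zip ps).any (fun q => x == q.1 && q.2 == "ChildOf")) :
    ∀ (suf pre : List String) (f : PySem.Dict String Int) (tE tP : List String) (seen : PySem.Set String),
      es = pre ++ suf →
      (∀ x, f.getD x 0 = if 2 ≤ es.count x then (pre.count x : Int) else 0) →
      (∀ x, PySem.Set.contains seen x = decide (x ∈ pre)) →
      ((pyEnum pre.length suf).foldl (stepA el es) (f, tE, tP)).2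
        = ((suf.zip (ps.drop pre.length)).foldl (stepB cnt childof) (seen, tE, tP)).2 := by
  intro suf
  induction suf with
  | nil => intro pre f tE tP seen _ _ _; simp [pyEnum]
  | cons e rest ih =>
    intro pre f tE tP seen hsplit hfind hseen
    have hi : pre.length < es.length := by rw [hsplit]; simp
    have hips : pre.length < ps.length := lt_of_lt_of_le hi hlen
    have hdrop : ps.drop pre.length = ps[pre.length] :: ps.drop (pre.length + 1) :=
      List.drop_eq_getElem_cons hips
    have hget : PySem.List.pyGetD ((PySem.Dict.mk el).getD "property" []) ((pre.length : Nat) : Int) ""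
        = ps[pre.length] := by
      rw [hpr]
      simp [PySem.List.pyGetD_natCast, List.getD_eq_getElem?_getD, List.getElem?_eq_getElem hips]
    have hgp : get_property e el
        = (if (es.zip ps).any (fun q => e == q.1 && q.2 == "ChildOf") then "ChildOf" else "-1") := by
      unfold get_property
      rw [hed, hpr, gpLoop_spec ps e es 0 (by omega)]
      simp
    have hany : ((pyEnum 0 es).any (fun q => e == q.2 && !(pre.length == q.1)))
        = (decide (e ∈ pre) || decide (e ∈ rest)) := by
      rw [hsplit]; exact anyOther_spec pre rest e
    have hcount : es.count e = pre.count e + 1 + rest.count e := by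
      rw [hsplit]; simp [List.count_append]; ring
    have hsplit' : es = (pre ++ [e]) ++ rest := by rw [hsplit]; simp
    have hlen' : (pre ++ [e]).length = pre.length + 1 := by simp
    rw [show pyEnum pre.length (e :: rest) = (pre.length, e) :: pyEnum (pre.length + 1) rest from rfl,
        List.foldl_cons, hdrop, List.zip_cons_cons, List.foldl_cons]
    by_cases hpe : e ∈ pre
    · -- duplicate already seen: A drops and bumps, B skips
      have hc1 : 1 ≤ pre.count e := List.count_pos_iff.mpr hpe
      have hdup : 2 ≤ es.count e := by omega
      have hanyT : ((pyEnum 0 es).any (fun q => e == q.2 && !(pre.length == q.1))) = true := by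
        rw [hany]; simp [hpe]
      have hstepA : stepA el es (f, tE, tP) (pre.length, e)
          = (f.insert e (f.getD e 0 + 1), tE, tP) := by
        have hcond : ¬ ((f.insert e (f.getD e 0 + 1)).getD e 0 < 2) := by
          rw [PySem.Dict.getD_insert_self, hfind e, if_pos hdup]
          have : (1:Int) ≤ (pre.count e : Int) := by exact_mod_cast hc1
          omega
        simp only [stepA, innerScanA_spec, hanyT, if_true, if_neg hcond]
      have hstepB : stepB cnt childof (seen, tE, tP) (e, ps[pre.length]) = (seen, tE, tP) := by
        simp only [stepB, hseen e]
        simp [hpe]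
      rw [hstepA, hstepB]
      have h2 : ∀ x, (f.insert e (f.getD e 0 + 1)).getD x 0
          = if 2 ≤ es.count x then ((pre ++ [e]).count x : Int) else 0 := by
        intro x
        by_cases hx : x = e
        · subst hx
          rw [PySem.Dict.getD_insert_self, hfind x, if_pos hdup, if_pos hdup]
          simp [List.count_append]
        · rw [PySem.Dict.getD_insert_of_ne _ _ _ hx, hfind x]
          simp [List.count_append, Ne.symm hx]
      have h3 : ∀ x, PySem.Set.contains seen x = decide (x ∈ pre ++ [e]) := by
        intro x
        rw [hseen x]
        by_cases hx : x = e
        · subst hx; simp [hpe]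
        · simp [hx]
      have := ih (pre ++ [e]) _ tE tP seen hsplit' h2 h3
      rw [hlen'] at this
      exact this
    · have hpe0 : pre.count e = 0 := List.count_eq_zero.mpr hpe
      by_cases hre : e ∈ rest
      · -- first occurrence of a duplicated edge: both emit, merged property
        have hc1 : 1 ≤ rest.count e := List.count_pos_iff.mpr hre
        have hdup : 2 ≤ es.count e := by omega
        have hanyT : ((pyEnum 0 es).any (fun q => e == q.2 && !(pre.length == q.1))) = true := by
          rw [hany]; simp [hre]
        have hpropeq :
            (if !((if (es.zip ps).any (fun q => e == q.1 && q.2 == "ChildOf") then "ChildOf" else "-1") == "-1")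
              then (if (es.zip ps).any (fun q => e == q.1 && q.2 == "ChildOf") then "ChildOf" else "-1")
              else ps[pre.length])
            = (if 1 < cnt.getD e 0 ∧ PySem.Set.contains childof e = true then "ChildOf" else ps[pre.length]) := by
          rw [hcnt e, hch e]
          by_cases hcC : ((es.zip ps).any (fun q => e == q.1 && q.2 == "ChildOf")) = true
          · have hcond : (1:Int) < (es.count e : Int) ∧ ((es.zip ps).any (fun q => e == q.1 && q.2 == "ChildOf")) = true := by
              refine ⟨by exact_mod_cast hdup, hcC⟩
            rw [if_pos hcC, if_pos hcond]
            simp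
          · simp only [Bool.not_eq_true] at hcC
            simp [hcC]
        have hstepA : stepA el es (f, tE, tP) (pre.length, e)
            = (f.insert e (f.getD e 0 + 1), tE ++ [e],
               tP ++ [if 1 < cnt.getD e 0 ∧ PySem.Set.contains childof e = true then "ChildOf" else ps[pre.length]]) := by
          have hcond : ((f.insert e (f.getD e 0 + 1)).getD e 0 < 2) := by
            rw [PySem.Dict.getD_insert_self, hfind e, if_pos hdup, hpe0]
            norm_num
          simp only [stepA, innerScanA_spec, hanyT, if_true, hget, hgp, if_pos hcond]
          rw [hpropeq]
        have hseenF : PySem.Set.contains seen e = false := by rw [hseen e]; simp [hpe]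
        have hstepB : stepB cnt childof (seen, tE, tP) (e, ps[pre.length])
            = (PySem.Set.add seen e, tE ++ [e],
               tP ++ [if 1 < cnt.getD e 0 ∧ PySem.Set.contains childof e = true then "ChildOf" else ps[pre.length]]) := by
          simp only [stepB, hseenF]
          simp
        rw [hstepA, hstepB]
        have h2 : ∀ x, (f.insert e (f.getD e 0 + 1)).getD x 0
            = if 2 ≤ es.count x then ((pre ++ [e]).count x : Int) else 0 := by
          intro x
          by_cases hx : x = e
          · subst hx
            rw [PySem.Dict.getD_insert_self, hfind x, if_pos hdup, if_pos hdup, hpe0]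
            simp [List.count_append, hpe0]
          · rw [PySem.Dict.getD_insert_of_ne _ _ _ hx, hfind x]
            simp [List.count_append, Ne.symm hx]
        have := ih (pre ++ [e]) _ (tE ++ [e])
          (tP ++ [if 1 < cnt.getD e 0 ∧ PySem.Set.contains childof e = true then "ChildOf" else ps[pre.length]])
          _ hsplit' h2 (seen_add_inv seen pre e hseen)
        rw [hlen'] at this
        exact this
      · -- unique edge: both emit it with its own property
        have hre0 : rest.count e = 0 := List.count_eq_zero.mpr hre
        have hcnt1 : es.count e = 1 := by omega
        have hanyF : ((pyEnum 0 es).any (fun q => e == q.2 && !(pre.length == q.1))) = false := by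
          rw [hany]; simp [hpe, hre]
        have hstepA : stepA el es (f, tE, tP) (pre.length, e)
            = (f, tE ++ [e], tP ++ [ps[pre.length]]) := by
          have hcond : (f.getD e 0 < 2) := by
            rw [hfind e, hcnt1]
            norm_num
          simp only [stepA, innerScanA_spec, hanyF, Bool.false_eq_true, if_false, hget, if_pos hcond]
        have hseenF : PySem.Set.contains seen e = false := by rw [hseen e]; simp [hpe]
        have hstepB : stepB cnt childof (seen, tE, tP) (e, ps[pre.length])
            = (PySem.Set.add seen e, tE ++ [e], tP ++ [ps[pre.length]]) := by
          have hcond : ¬ (1 < cnt.getD e 0 ∧ PySem.Set.contains childof e = true) := by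
            rw [hcnt e, hcnt1]
            norm_num
          simp only [stepB, hseenF, Bool.false_eq_true, if_false, if_neg hcond]
        rw [hstepA, hstepB]
        have h2 : ∀ x, f.getD x 0
            = if 2 ≤ es.count x then ((pre ++ [e]).count x : Int) else 0 := by
          intro x
          by_cases hx : x = e
          · subst hx
            rw [hfind x, hcnt1]
            norm_num
          · rw [hfind x]
            simp [List.count_append, Ne.symm hx]
        have := ih (pre ++ [e]) _ (tE ++ [e]) (tP ++ [ps[pre.length]]) _ hsplit' h2 (seen_add_inv seen pre e hseen)
        rw [hlen'] at this
        exact this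
lemma process_eq (el : List (String × List String))
    (hpre : (PySem.Dict.mk el).getD "edges" [] ≠ [] →
      ((PySem.Dict.mk el).getD "edges" []).length ≤ ((PySem.Dict.mk el).getD "property" []).length) :
    processA el = processB el := by
  by_cases hc : (PySem.Dict.mk el).contains "edges" = true
  · by_cases hne : (PySem.Dict.mk el).getD "edges" [] = []
    · simp [processA, processB, hc, hne, pyEnum]
    · have hlen := hpre hne
      have hemp : ((PySem.Dict.mk el).getD "edges" []).isEmpty = false := by
        simp [hne]
      have hcnt : ∀ x, (((PySem.Dict.mk el).getD "edges" []).foldl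
          (fun c e => c.insert e (c.getD e 0 + 1)) (PySem.Dict.mk [])).getD x 0
          = ((((PySem.Dict.mk el).getD "edges" []).count x : Int)) := by
        intro x
        rw [PySem.Dict.getD_foldl_insert_add_one]
        norm_num [show ((PySem.Dict.mk []) : PySem.Dict String Int).getD x 0 = 0 from rfl]
      have hfind : ∀ x, (((PySem.Dict.mk el).getD "edges" []).foldl
          (fun f e => f.insert e (0 : Int)) (PySem.Dict.mk [])).getD x 0
          = if 2 ≤ (((PySem.Dict.mk el).getD "edges" []).count x) then ((([] : List String).count x : Int)) else 0 := by
        intro x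
        rw [getD_find0 _ _ _ rfl]
        simp
      have hseen : ∀ x, PySem.Set.contains PySem.Set.empty x = decide (x ∈ ([] : List String)) := by
        intro x; rfl
      have hfold := loop_eq el ((PySem.Dict.mk el).getD "edges" []) ((PySem.Dict.mk el).getD "property" [])
        (((PySem.Dict.mk el).getD "edges" []).foldl (fun c e => c.insert e (c.getD e 0 + 1)) (PySem.Dict.mk []))
        (PySem.Set.ofList (((((PySem.Dict.mk el).getD "edges" []).zip ((PySem.Dict.mk el).getD "property" [])).filter (fun q => q.2 == "ChildOf")).map (fun q => q.1)))
        hlen rfl rfl hcnt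
        (fun x => childof_contains _ _ x)
        ((PySem.Dict.mk el).getD "edges" []) [] _ [] [] PySem.Set.empty rfl hfind hseen
      simp only [List.length_nil, List.drop_zero] at hfold
      simp only [processA, processB, hc, if_true, hemp, Bool.false_eq_true, if_false]
      rw [hfold]
  · simp only [Bool.not_eq_true] at hc
    simp [processA, processB, hc]

-- ===== VERDICT (by name: the statement is the Claim_ definition above) =====
theorem delete_double_father_spec : Claim_equal_delete_double_father := by
  intro dict _hdom hpre
  unfold Spec_delete_double_father delete_double_father delete_double_father_alt
  refine List.map_congr_left (fun p hp => ?_)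
  have h := hpre p hp
  have : processA p.2 = processB p.2 := process_eq p.2 (fun hne => (h hne).2)
  simp [this]
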